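-- pv_equiv track=rewrite | github.com/ciwanceylan/dirswitch-experiments-tmlr2025 | reachnes-tmlr2025/torch-sprsvd/src/torch_sprsvd/core.py | fix_num_oversampling_and_block_size
-- ===== SOURCE A (Python) =====
-- def fix_num_oversampling_and_block_size(
--     k: int, num_oversampling: int, block_size: int, num_cols: int
-- ):
--     num_oversampling = min(num_cols - k, num_oversampling)
--     block_size_residual = (k + num_oversampling) % block_size
--     if block_size_residual > 0 and (k + num_oversampling) == num_cols:
--         # In this the oversampling should not be changed.
--         block_size = 1
--     elif block_size_residual > 0:
--         # Try to increase the num_oversampling to match the block size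
--         num_oversampling = num_oversampling + block_size - block_size_residual
--         num_oversampling, block_size = fix_num_oversampling_and_block_size(
--             k, num_oversampling, block_size, num_cols
--         )
--     return num_oversampling, block_size
-- ===== SOURCE B (Python) =====
-- def fix_num_oversampling_and_block_size(
--     k: int, num_oversampling: int, block_size: int, num_cols: int
-- ):
--     num_oversampling = min(num_cols - k, num_oversampling)
--     total = k + num_oversampling
--     r = total % block_size
--     if r > 0:
--         if total == num_cols:
--             return num_oversampling, 1
--         target = total + block_size - r
--         if target <= num_cols:
--             return target - k, block_size
--         if num_cols % block_size == 0:
--             return num_cols - k, block_size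
--         return num_cols - k, 1
--     return num_oversampling, block_size
-- ===== Notes on version B (the rewrite author's own statement) =====
-- stated objective: simpler
-- what changed: Replaces A's recursion with a closed-form branch: round k+num_oversampling up to the next multiple of block_size and clamp to num_cols, deciding the block_size=1 fallback directly.
import Mathlib
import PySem

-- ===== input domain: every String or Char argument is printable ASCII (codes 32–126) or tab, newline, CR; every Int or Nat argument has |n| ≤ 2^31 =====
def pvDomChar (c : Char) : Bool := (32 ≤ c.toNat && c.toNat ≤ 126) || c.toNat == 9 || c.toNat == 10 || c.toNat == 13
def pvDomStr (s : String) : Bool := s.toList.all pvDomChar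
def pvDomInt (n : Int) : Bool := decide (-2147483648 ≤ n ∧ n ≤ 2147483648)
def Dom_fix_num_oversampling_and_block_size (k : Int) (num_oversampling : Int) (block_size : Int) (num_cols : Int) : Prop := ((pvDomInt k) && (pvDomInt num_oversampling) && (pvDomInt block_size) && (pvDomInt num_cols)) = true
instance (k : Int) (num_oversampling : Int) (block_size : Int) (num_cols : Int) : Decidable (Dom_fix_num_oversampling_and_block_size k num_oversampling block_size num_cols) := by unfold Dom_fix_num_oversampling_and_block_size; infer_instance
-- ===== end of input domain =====

-- B replaces A's self-recursion with a closed-form branch on the next multiple of block_size (objective: simpler).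


-- ===== PORT A =====
-- A's self-recursion, with a fuel guard for totality only: on Pre_ (block_size ≠ 0) the
-- recursion depth is at most 2 calls, so fuel 2 is never exhausted (the proof below never
-- reaches the fuel-0 case on admitted inputs).
def fixAux : Nat → Int → Int → Int → Int → Int × Int
  | 0, _, num_oversampling, block_size, _ => (num_oversampling, block_size)
  | fuel+1, k, num_oversampling, block_size, num_cols =>
    let no1 := min (num_cols - k) num_oversampling
    let residual := PySem.Int.mod (k + no1) block_size
    if 0 < residual ∧ k + no1 = num_cols then (no1, 1)
    else if 0 < residual then
      fixAux fuel k (no1 + block_size - residual) block_size num_cols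
    else (no1, block_size)

def fix_num_oversampling_and_block_size (k : Int) (num_oversampling : Int) (block_size : Int) (num_cols : Int) : Int × Int :=
  fixAux 2 k num_oversampling block_size num_cols

-- ===== PORT B =====
def fix_num_oversampling_and_block_size_alt (k : Int) (num_oversampling : Int) (block_size : Int) (num_cols : Int) : Int × Int :=
  let no1 := min (num_cols - k) num_oversampling
  let total := k + no1
  let r := PySem.Int.mod total block_size
  if 0 < r then
    if total = num_cols then (no1, 1)
    else
      let target := total + block_size - r
      if target ≤ num_cols then (target - k, block_size)
      else if PySem.Int.mod num_cols block_size = 0 then (num_cols - k, block_size)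
      else (num_cols - k, 1)
  else (no1, block_size)

-- ===== PRECONDITION & SPEC =====
-- Pre_ excludes exactly block_size = 0, on which the Python A raises ZeroDivisionError.
def Pre_fix_num_oversampling_and_block_size (k : Int) (num_oversampling : Int) (block_size : Int) (num_cols : Int) : Prop := block_size ≠ 0
instance (k : Int) (num_oversampling : Int) (block_size : Int) (num_cols : Int) : Decidable (Pre_fix_num_oversampling_and_block_size k num_oversampling block_size num_cols) := by unfold Pre_fix_num_oversampling_and_block_size; infer_instance
def pvWitness_fix_num_oversampling_and_block_size : Int × Int × Int × Int := (3, 5, 4, 20)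

def Spec_fix_num_oversampling_and_block_size (k : Int) (num_oversampling : Int) (block_size : Int) (num_cols : Int) (out : Int × Int) : Prop := out = fix_num_oversampling_and_block_size_alt k num_oversampling block_size num_cols
instance (k : Int) (num_oversampling : Int) (block_size : Int) (num_cols : Int) (out : Int × Int) : Decidable (Spec_fix_num_oversampling_and_block_size k num_oversampling block_size num_cols out) := by unfold Spec_fix_num_oversampling_and_block_size; infer_instance

-- ===== CLAIM (what is proved, stated in full; the proofs are below) =====
def Claim_equal_fix_num_oversampling_and_block_size : Prop := ∀ (k : Int) (num_oversampling : Int) (block_size : Int) (num_cols : Int), Dom_fix_num_oversampling_and_block_size k num_oversampling block_size num_cols → Pre_fix_num_oversampling_and_block_size k num_oversampling block_size num_cols → Spec_fix_num_oversampling_and_block_size k num_oversampling block_size num_cols (fix_num_oversampling_and_block_size k num_oversampling block_size num_cols)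

-- ===== LEMMAS AND PROOFS =====

-- ===== VERDICT (by name: the statement is the Claim_ definition above) =====
theorem fix_num_oversampling_and_block_size_spec : Claim_equal_fix_num_oversampling_and_block_size := by
  intro k no bs nc _ hbs
  unfold Spec_fix_num_oversampling_and_block_size
  unfold Pre_fix_num_oversampling_and_block_size at hbs
  rcases lt_or_gt_of_ne hbs with hneg | hpos
  · -- bs < 0 : Python's % has the divisor's sign, so residual ≤ 0 and neither side branches
    have h1 := PySem.Int.mod_neg_bounds (a := k + min (nc - k) no) hneg
    simp only [fix_num_oversampling_and_block_size, fixAux,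
      fix_num_oversampling_and_block_size_alt]
    rw [if_neg (by omega), if_neg (by omega), if_neg (by omega)]
  · -- bs > 0 : mod is emod; unfold two levels of A's recursion and compare case by case
    simp only [fix_num_oversampling_and_block_size, fixAux,
      fix_num_oversampling_and_block_size_alt,
      PySem.Int.mod_eq_emod_of_pos hpos]
    generalize hm : min (nc - k) no = m
    have hmle : m ≤ nc - k := hm ▸ min_le_left _ _
    generalize hr : (k + m) % bs = r
    have hrlt : r < bs := hr ▸ Int.emod_lt_of_pos _ hpos
    have hrnn : 0 ≤ r := hr ▸ Int.emod_nonneg _ (by omega)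
    obtain ⟨q, hq⟩ : ∃ q, k + m = bs * q + r :=
      ⟨(k + m) / bs, by rw [← hr]; exact (Int.ediv_add_emod _ _).symm⟩
    by_cases hr0 : 0 < r
    · by_cases heq : k + m = nc
      · rw [if_pos (And.intro hr0 heq), if_pos hr0, if_pos heq]
      · rw [if_neg (by tauto), if_pos hr0, if_pos hr0, if_neg heq]
        by_cases hc : m + bs - r ≤ nc - k
        · rw [min_eq_right hc, show k + (m + bs - r) = bs * (q + 1) by linear_combination hq,
              Int.mul_emod_right]
          rw [if_neg (by omega), if_neg (by omega), if_pos (by omega)]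
          have : k + m + bs - r - k = m + bs - r := by omega
          rw [this]
        · rw [min_eq_left (by omega), show k + (nc - k) = nc by ring]
          by_cases hr2 : 0 < nc % bs
          · rw [if_pos (And.intro hr2 rfl), if_neg (by omega), if_neg (by omega)]
          · have h4 : nc % bs = 0 := by
              have := Int.emod_nonneg nc (show bs ≠ 0 by omega); omega
            rw [if_neg (by tauto), if_neg hr2, if_neg (by omega), if_pos h4]
    · rw [if_neg (by tauto), if_neg hr0, if_neg hr0]
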